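-- pv_equiv track=rewrite | github.com/johngao01/Avelen | platforms/douyin.py | reg_to_array
-- ===== SOURCE A (Python) =====
-- def reg_to_array(a):
--     o = [0] * 32
--     for i in range(8):
--         c = a[i]
--         o[4 * i + 3] = (255 & c)
--         c >>= 8
--         o[4 * i + 2] = (255 & c)
--         c >>= 8
--         o[4 * i + 1] = (255 & c)
--         c >>= 8
--         o[4 * i] = (255 & c)
--
--     return o
-- ===== SOURCE B (Python) =====
-- import struct
--
--
-- def reg_to_array(a):
--     vals = [a[i] & 0xFFFFFFFF for i in range(8)]
--     return list(struct.pack('>8I', *vals))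
-- ===== Notes on version B (the rewrite author's own statement) =====
-- stated objective: idiomatic
-- what changed: B replaces the manual shift-and-mask loop writing into a preallocated 32-slot list by masking each register to 32 bits and serializing the eight values with a single big-endian struct.pack call.
import Mathlib
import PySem

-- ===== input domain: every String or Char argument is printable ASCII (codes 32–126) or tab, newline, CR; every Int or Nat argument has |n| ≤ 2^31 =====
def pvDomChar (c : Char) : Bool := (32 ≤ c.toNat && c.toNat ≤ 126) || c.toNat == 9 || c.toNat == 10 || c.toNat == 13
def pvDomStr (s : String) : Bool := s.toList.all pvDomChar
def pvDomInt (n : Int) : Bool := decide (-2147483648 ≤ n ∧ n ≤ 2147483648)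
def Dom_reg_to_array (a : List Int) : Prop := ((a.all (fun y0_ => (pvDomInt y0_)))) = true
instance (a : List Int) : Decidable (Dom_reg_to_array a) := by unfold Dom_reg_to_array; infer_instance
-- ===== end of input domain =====

-- B replaces A's manual shift/mask loop over a preallocated 32-slot list by masking each
-- register to 32 bits and serializing the eight values with one big-endian struct.pack call.

-- ===== PORT A =====
-- the body of A's for-loop (writes the four big-endian bytes of a[i] into o[4i..4i+3])
def regBody (a : List Int) (o : List Int) (i : Int) : List Int :=
  let c := PySem.List.pyGetD a i 0
  let o := PySem.List.pySetD o (4 * i + 3) (PySem.Int.band 255 c)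
  let c := c >>> (8 : Nat)
  let o := PySem.List.pySetD o (4 * i + 2) (PySem.Int.band 255 c)
  let c := c >>> (8 : Nat)
  let o := PySem.List.pySetD o (4 * i + 1) (PySem.Int.band 255 c)
  let c := c >>> (8 : Nat)
  PySem.List.pySetD o (4 * i) (PySem.Int.band 255 c)

def reg_to_array (a : List Int) : List Int :=
  (PySem.List.pyRange 0 8 1).foldl (regBody a) (List.replicate 32 0)

-- ===== PORT B =====
-- struct.pack('>8I', *vals) is ported as its contract: each value (already reduced to
-- [0, 2^32) by the mask) contributes its four big-endian bytes.
def pack4 (v : Int) : List Int := [v / 16777216 % 256, v / 65536 % 256, v / 256 % 256, v % 256]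

def reg_to_array_alt (a : List Int) : List Int :=
  ((PySem.List.pyRange 0 8 1).map
    (fun i => PySem.Int.band (PySem.List.pyGetD a i 0) 4294967295)).flatMap pack4

-- ===== PRECONDITION & SPEC =====
-- A (and B) raise IndexError when the list has fewer than 8 elements; Pre_ excludes exactly those.
def Pre_reg_to_array (a : List Int) : Prop := 8 ≤ a.length
instance (a : List Int) : Decidable (Pre_reg_to_array a) := by unfold Pre_reg_to_array; infer_instance
def pvWitness_reg_to_array : List Int := [1, -2, 3, 255, 256, -2147483648, 2147483648, 0]

def Spec_reg_to_array (a : List Int) (out : List Int) : Prop := out = reg_to_array_alt a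
instance (a : List Int) (out : List Int) : Decidable (Spec_reg_to_array a out) := by unfold Spec_reg_to_array; infer_instance

-- ===== CLAIM (what is proved, stated in full; the proofs are below) =====
def Claim_equal_reg_to_array : Prop := ∀ (a : List Int), Dom_reg_to_array a → Pre_reg_to_array a → Spec_reg_to_array a (reg_to_array a)

-- ===== LEMMAS AND PROOFS =====

-- A's result block for register k, as A's loop body leaves it in positions 4k..4k+3
def blockA (a : List Int) (k : Nat) : List Int :=
  let c := PySem.List.pyGetD a (k : Int) 0
  [PySem.Int.band 255 (c >>> (8:Nat) >>> (8:Nat) >>> (8:Nat)),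
   PySem.Int.band 255 (c >>> (8:Nat) >>> (8:Nat)),
   PySem.Int.band 255 (c >>> (8:Nat)),
   PySem.Int.band 255 c]

theorem band_255 (c : Int) : PySem.Int.band 255 c = c % 256 := by
  have key : ∀ n : Nat, n &&& 255 = n % 256 := fun n => by
    have := Nat.and_two_pow_sub_one_eq_mod n 8; norm_num at this; exact this
  rw [PySem.Int.band_comm]
  unfold PySem.Int.band
  split_ifs with h1 h2 h2
  · rw [show ((255:Int)).toNat = 255 from rfl, key]; omega
  · omega
  · rw [show ((255:Int)).toNat = 255 from rfl, Nat.and_comm, key]; omega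
  · omega

theorem band_mask32 (c : Int) : PySem.Int.band c 4294967295 = c % 4294967296 := by
  have key : ∀ n : Nat, n &&& 4294967295 = n % 4294967296 := fun n => by
    have := Nat.and_two_pow_sub_one_eq_mod n 32; norm_num at this; exact this
  unfold PySem.Int.band
  split_ifs with h1 h2 h2
  · rw [show ((4294967295:Int)).toNat = 4294967295 from rfl, key]; omega
  · omega
  · rw [show ((4294967295:Int)).toNat = 4294967295 from rfl, Nat.and_comm, key]; omega
  · omega

theorem shr8 (c : Int) : c >>> (8:Nat) = c / 256 := by
  have := Int.shiftRight_eq_div_pow c 8; norm_num at this; exact this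

theorem bytes_eq (a : List Int) : blockA a = fun (k : Nat) =>
    pack4 (PySem.Int.band (PySem.List.pyGetD a ((k : Nat) : Int) 0) 4294967295) := by
  funext k
  simp only [blockA, pack4, band_255, band_mask32, shr8, List.cons.injEq, and_true]
  and_intros <;> omega

theorem step (a o : List Int) (k : Nat) (h : o.length = 32) (hk : k < 8) :
    regBody a o (k : Int) = o.take (4*k) ++ blockA a k ++ o.drop (4*k+4) := by
  have t3 : ((4:Int) * (k:Int) + 3).toNat = 4*k+3 := by omega
  have t2 : ((4:Int) * (k:Int) + 2).toNat = 4*k+2 := by omega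
  have t1 : ((4:Int) * (k:Int) + 1).toNat = 4*k+1 := by omega
  have t0 : ((4:Int) * (k:Int)).toNat = 4*k := by omega
  simp only [regBody]
  rw [PySem.List.pySetD_of_nonneg _ _ (by omega), PySem.List.pySetD_of_nonneg _ _ (by omega),
      PySem.List.pySetD_of_nonneg _ _ (by omega), PySem.List.pySetD_of_nonneg _ _ (by omega)]
  simp only [t3, t2, t1, t0]
  have ht : (o.take (4*k)).length = 4*k := by simp [h]; omega
  have hb : (blockA a k).length = 4 := by simp [blockA]
  apply List.ext_getElem
  · simp [blockA, h]; omega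
  · intro j hj1 hj2
    simp only [List.length_set, h] at hj1
    simp only [List.getElem_set]
    have hj32 : j < 32 := hj1
    rcases Nat.lt_or_ge j (4*k) with hlt | hge
    · rw [if_neg (by omega), if_neg (by omega), if_neg (by omega), if_neg (by omega),
        List.getElem_append_left (by simp [ht, hb]; try omega),
        List.getElem_append_left (by simp [ht]; try omega), List.getElem_take]
    · have hcase : j = 4*k ∨ j = 4*k+1 ∨ j = 4*k+2 ∨ j = 4*k+3 ∨ 4*k+4 ≤ j := by omega
      rcases hcase with hj | hj | hj | hj | hj
      · subst hj
        rw [if_pos rfl, List.getElem_append_left (by simp [ht, hb]; try omega),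
          List.getElem_append_right (by rw [ht]; try omega)]
        simp [ht, blockA]
      · subst hj
        rw [if_neg (by omega), if_pos rfl, List.getElem_append_left (by simp [ht, hb]; try omega),
          List.getElem_append_right (by rw [ht]; try omega)]
        simp [ht, blockA]
      · subst hj
        rw [if_neg (by omega), if_neg (by omega), if_pos rfl,
          List.getElem_append_left (by simp [ht, hb]; try omega),
          List.getElem_append_right (by rw [ht]; try omega)]
        simp [ht, blockA]
      · subst hj
        rw [if_neg (by omega), if_neg (by omega), if_neg (by omega), if_pos rfl,
          List.getElem_append_left (by simp [ht, hb]; try omega),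
          List.getElem_append_right (by rw [ht]; try omega)]
        simp [ht, blockA]
      · rw [if_neg (by omega), if_neg (by omega), if_neg (by omega), if_neg (by omega),
          List.getElem_append_right (by simp [ht, hb]; try omega), List.getElem_drop]
        congr 1
        simp [ht, hb]
        omega

theorem loop (a : List Int) : ∀ (m j : Nat), j + m = 8 → ∀ o : List Int, o.length = 32 →
    ((List.range' j m).map (fun n => ((n : Nat) : Int))).foldl (regBody a) o
      = o.take (4*j) ++ (List.range' j m).flatMap (blockA a) := by
  intro m
  induction m with
  | zero =>
    intro j hj o h
    have hj8 : j = 8 := by omega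
    subst hj8
    simp [List.take_of_length_le (by omega : o.length ≤ 32)]
  | succ m ih =>
    intro j hj o h
    rw [List.range'_succ]
    simp only [List.map_cons, List.foldl_cons, List.flatMap_cons]
    rw [step a o j h (by omega)]
    have hlen : (o.take (4*j) ++ blockA a j ++ o.drop (4*j+4)).length = 32 := by
      simp [blockA, h]; omega
    rw [ih (j+1) (by omega) _ hlen]
    have ht : (o.take (4*j)).length = 4*j := by simp [h]; omega
    have hb : (blockA a j).length = 4 := by simp [blockA]
    have htake : (o.take (4*j) ++ blockA a j ++ o.drop (4*j+4)).take (4*(j+1))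
        = o.take (4*j) ++ blockA a j := by
      have hx : (o.take (4*j) ++ blockA a j).length = 4*(j+1) := by
        simp only [List.length_append, ht, hb]; omega
      rw [← hx, List.take_left]
    rw [htake, List.append_assoc]

theorem main_eq (a : List Int) : reg_to_array a = reg_to_array_alt a := by
  unfold reg_to_array reg_to_array_alt
  have hr : PySem.List.pyRange 0 8 1 = (List.range' 0 8).map (fun n => ((n : Nat) : Int)) := by
    decide
  rw [hr, loop a 8 0 rfl _ (by simp)]
  rw [bytes_eq a]
  simp [List.flatMap_map, List.getD]

-- ===== VERDICT (by name: the statement is the Claim_ definition above) =====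
theorem reg_to_array_spec : Claim_equal_reg_to_array := by
  intro a _ _
  unfold Spec_reg_to_array
  exact main_eq a
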